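-- pv_equiv track=rewrite | github.com/vvladdy/StepicGit | Game_KNB_Visel_other.py | anton
-- ===== SOURCE A (Python) =====
-- def anton(string: str):
--     exam = 'anton'
--     newstr = ''
--     for i in string:
--         if i in exam:
--             newstr += i
--     if newstr == exam:
--         return True
--     else:
--         return False
-- ===== SOURCE B (Python) =====
-- def anton(string: str):
--     target = 'anton'
--     pos = 0
--     for ch in string:
--         if ch in target:
--             if pos < len(target) and target[pos] == ch:
--                 pos += 1
--             else:
--                 return False
--     return pos == len(target)
-- ===== Notes on version B (the rewrite author's own statement) =====
-- stated objective: alternative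
-- what changed: B replaces A's build-a-filtered-string-then-compare pass with incremental pointer matching against the target word, returning False at the first mismatching or extra relevant character instead of accumulating a string.
import Mathlib
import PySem

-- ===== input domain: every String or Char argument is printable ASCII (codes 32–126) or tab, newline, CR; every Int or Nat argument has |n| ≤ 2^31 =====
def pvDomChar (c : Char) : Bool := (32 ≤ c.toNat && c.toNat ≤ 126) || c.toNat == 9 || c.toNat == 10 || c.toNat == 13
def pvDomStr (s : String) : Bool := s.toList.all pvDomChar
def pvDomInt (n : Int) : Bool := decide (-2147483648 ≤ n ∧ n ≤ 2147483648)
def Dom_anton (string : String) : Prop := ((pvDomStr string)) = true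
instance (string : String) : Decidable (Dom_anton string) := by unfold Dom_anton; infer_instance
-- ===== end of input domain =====

-- B replaces A's build-a-filtered-string-then-compare pass with incremental pointer matching (alternative decomposition, same cost).

-- the characters of the constant 'anton' shared by both sources
def examChars : List Char := ['a', 'n', 't', 'o', 'n']

-- ===== PORT A =====
-- 'i in exam' (char-in-string membership) is ported as list membership over exam's characters; exact for single chars.
def anton (string : String) : Bool :=
  let newstr : List Char :=
    string.toList.foldl (fun ns i => if i ∈ examChars then ns ++ [i] else ns) []
  if newstr == examChars then true else false

-- ===== PORT B =====
-- 'pos < len(target) and target[pos] == ch' is ported via getElem?: some t with t == ch exactly when in range and equal.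
def antonGo (cs : List Char) (pos : Nat) : Bool :=
  match cs with
  | [] => pos == 5
  | c :: rest =>
    if c ∈ examChars then
      match examChars[pos]? with
      | some t => if t == c then antonGo rest (pos + 1) else false
      | none => false
    else antonGo rest pos

def anton_alt (string : String) : Bool := antonGo string.toList 0

-- ===== PRECONDITION & SPEC =====
def Spec_anton (string : String) (out : Bool) : Prop := out = anton_alt string
instance (string : String) (out : Bool) : Decidable (Spec_anton string out) := by unfold Spec_anton; infer_instance

-- ===== CLAIM (what is proved, stated in full; the proofs are below) =====
def Claim_equal_anton : Prop := ∀ (string : String), Dom_anton string → Spec_anton string (anton string)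

-- ===== LEMMAS AND PROOFS =====

lemma anton_fold_acc (cs : List Char) (acc : List Char) :
    cs.foldl (fun ns i => if i ∈ examChars then ns ++ [i] else ns) acc
      = acc ++ cs.filter (fun i => i ∈ examChars) := by
  induction cs generalizing acc with
  | nil => simp
  | cons c cs ih =>
    rw [List.foldl_cons, ih, List.filter_cons]
    by_cases hc : c ∈ examChars <;> simp [hc]

lemma antonGo_iff (cs : List Char) : ∀ pos, pos ≤ 5 →
    (antonGo cs pos = true
      ↔ examChars.drop pos = cs.filter (fun i => i ∈ examChars)) := by
  induction cs with
  | nil =>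
    intro pos h
    interval_cases pos <;> simp [antonGo, examChars]
  | cons c cs ih =>
    intro pos h
    rw [List.filter_cons]
    by_cases hc : c ∈ examChars
    · fin_cases hc <;> interval_cases pos <;>
        simp [antonGo, examChars, ih]
    · simp [antonGo, hc, ih pos h]

-- ===== VERDICT (by name: the statement is the Claim_ definition above) =====
theorem anton_spec : Claim_equal_anton := by
  intro s _
  unfold Spec_anton anton anton_alt
  dsimp only
  rw [anton_fold_acc, List.nil_append]
  have h := antonGo_iff s.toList 0 (by norm_num)
  rw [List.drop_zero] at h
  by_cases hf : s.toList.filter (fun i => i ∈ examChars) = examChars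
  · rw [h.mpr hf.symm]
    simp [hf]
  · have hgo : antonGo s.toList 0 = false := by
      cases hb : antonGo s.toList 0
      · rfl
      · exact absurd (h.mp hb).symm hf
    rw [hgo]
    simp [hf]
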